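-- pv_equiv track=rewrite | github.com/freyasheth/ai-project | main.py | select_flow_obstacle
-- ===== SOURCE A (Python) =====
-- from collections import deque
--
-- N = 10
--
-- START = (0, 0)
--
-- GOAL = (N - 1, N - 1)
--
-- ACTIONS = ['up', 'down', 'left', 'right']
--
-- ACTION_DICT = {'up': (-1, 0), 'down': (1, 0), 'left': (0, -1), 'right': (0, 1)}
--
-- def is_valid(pos, obstacles):
--     x, y = pos
--     return 0 <= x < N and 0 <= y < N and pos not in obstacles
--
-- def bfs_path_exists(obstacles):
--     if START in obstacles or GOAL in obstacles:
--         return False, []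
--     visited = {START}
--     queue = deque([(START, [START])])
--     while queue:
--         state, path = queue.popleft()
--         if state == GOAL:
--             return True, path
--         for action in ACTIONS:
--             dx, dy = ACTION_DICT[action]
--             neighbor = (state[0] + dx, state[1] + dy)
--             if neighbor not in visited and is_valid(neighbor, obstacles):
--                 visited.add(neighbor)
--                 queue.append((neighbor, path + [neighbor]))
--     return False, []
--
-- def select_flow_obstacle(obstacles, path):
--     if len(path) < 6:
--         return None
--     candidate_indices = range(len(path) // 4, len(path) * 3 // 4)
--     for idx in candidate_indices:
--         pos = path[idx]
--         if pos not in obstacles and pos != START and pos != GOAL: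
--             new_obstacles = obstacles | {pos}
--             if bfs_path_exists(new_obstacles)[0]:
--                 return pos
--     return None
-- ===== SOURCE B (Python) =====
-- N = 10
-- START = (0, 0)
-- GOAL = (N - 1, N - 1)
--
-- def _reachable(obstacles):
--     """Reachability-only DFS flood-fill: visited set + explicit stack, no paths."""
--     if START in obstacles or GOAL in obstacles:
--         return False
--     visited = set()
--     stack = [START]
--     while stack:
--         pos = stack.pop()
--         if pos == GOAL:
--             return True
--         if pos in visited:
--             continue
--         visited.add(pos)
--         x, y = pos
--         for nb in ((x - 1, y), (x + 1, y), (x, y - 1), (x, y + 1)):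
--             if nb not in visited and 0 <= nb[0] < N and 0 <= nb[1] < N and nb not in obstacles:
--                 stack.append(nb)
--     return False
--
-- def select_flow_obstacle(obstacles, path):
--     if len(path) < 6:
--         return None
--     for idx in range(len(path) // 4, len(path) * 3 // 4):
--         pos = path[idx]
--         if pos not in obstacles and pos != START and pos != GOAL:
--             blocked = set(obstacles)
--             blocked.add(pos)
--             if _reachable(blocked):
--                 return pos
--     return None
-- ===== Notes on version B (the rewrite author's own statement) =====
-- stated objective: simpler
-- what changed: The path-carrying BFS (deque of (cell, path) pairs, path lists copied on every enqueue) is replaced by a reachability-only DFS flood-fill with an explicit stack and a visited set; no path is ever built, only the boolean matters.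
import Mathlib
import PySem

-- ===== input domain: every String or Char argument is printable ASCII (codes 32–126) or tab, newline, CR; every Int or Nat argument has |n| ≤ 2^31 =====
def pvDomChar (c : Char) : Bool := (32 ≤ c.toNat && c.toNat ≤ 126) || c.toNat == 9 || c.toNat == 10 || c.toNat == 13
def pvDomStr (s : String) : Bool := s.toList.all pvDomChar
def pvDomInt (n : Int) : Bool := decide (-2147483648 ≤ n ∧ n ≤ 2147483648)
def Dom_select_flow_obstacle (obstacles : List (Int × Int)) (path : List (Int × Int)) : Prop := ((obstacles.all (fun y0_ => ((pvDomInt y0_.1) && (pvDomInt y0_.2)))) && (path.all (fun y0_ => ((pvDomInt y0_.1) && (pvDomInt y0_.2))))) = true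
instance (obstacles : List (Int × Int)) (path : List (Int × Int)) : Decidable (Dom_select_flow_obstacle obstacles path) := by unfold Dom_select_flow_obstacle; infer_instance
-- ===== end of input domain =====

-- B replaces A's path-carrying BFS (deque of (cell, path) pairs) by a reachability-only
-- DFS flood-fill (visited set + plain stack, no paths); objective: simpler.
-- The 'obstacles' argument is a Python set (PySem.Set): a list of distinct cells.

-- ===== PORT A =====
def pvSTART : Int × Int := (0, 0)
def pvGOAL : Int × Int := (9, 9)

-- ACTIONS with ACTION_DICT applied, in Python's iteration order up/down/left/right
def pvDELTAS : List (Int × Int) := [(-1, 0), (1, 0), (0, -1), (0, 1)]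

def pvIsValid (pos : Int × Int) (obstacles : List (Int × Int)) : Bool :=
  decide (0 ≤ pos.1 ∧ pos.1 < 10) && decide (0 ≤ pos.2 ∧ pos.2 < 10) && !(obstacles.contains pos)

-- body of the 'for action in ACTIONS' loop of bfs_path_exists
def pvBfsStep (obstacles : List (Int × Int)) (state : Int × Int) (path : List (Int × Int))
    (vq : List (Int × Int) × List ((Int × Int) × List (Int × Int))) (d : Int × Int) :
    List (Int × Int) × List ((Int × Int) × List (Int × Int)) :=
  let neighbor := (state.1 + d.1, state.2 + d.2)
  if !(vq.1.contains neighbor) && pvIsValid neighbor obstacles then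
    (vq.1 ++ [neighbor], vq.2 ++ [(neighbor, path ++ [neighbor])])
  else vq

-- the 'while queue' loop; fuel only totalizes (≤ 100 pops happen, proved below)
def pvBfsLoop (obstacles : List (Int × Int)) :
    Nat → List (Int × Int) → List ((Int × Int) × List (Int × Int)) → Bool × List (Int × Int)
  | 0, _, _ => (false, [])
  | fuel + 1, visited, queue =>
    match queue with
    | [] => (false, [])
    | (state, path) :: rest =>
      if state = pvGOAL then (true, path)
      else
        let vq := pvDELTAS.foldl (pvBfsStep obstacles state path) (visited, rest)
        pvBfsLoop obstacles fuel vq.1 vq.2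

def pvBfsPathExists (obstacles : List (Int × Int)) : Bool × List (Int × Int) :=
  if obstacles.contains pvSTART || obstacles.contains pvGOAL then (false, [])
  else pvBfsLoop obstacles 1000 [pvSTART] [(pvSTART, [pvSTART])]

-- the 'for idx in candidate_indices' loop of select_flow_obstacle
def pvSelLoopA (obstacles path : List (Int × Int)) : List Int → Option (Int × Int)
  | [] => none
  | idx :: restIdx =>
    let pos := (PySem.List.pyGet? path idx).getD (0, 0)   -- idx is always in range; getD only totalizes
    if pos ∉ obstacles ∧ pos ≠ pvSTART ∧ pos ≠ pvGOAL then
      if (pvBfsPathExists (PySem.Set.union obstacles [pos])).1 then some pos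
      else pvSelLoopA obstacles path restIdx
    else pvSelLoopA obstacles path restIdx

def select_flow_obstacle (obstacles : List (Int × Int)) (path : List (Int × Int)) : Option (Int × Int) :=
  if path.length < 6 then none
  else pvSelLoopA obstacles path
    (PySem.List.pyRange (PySem.Int.floordiv (path.length : Int) 4)
      (PySem.Int.floordiv ((path.length : Int) * 3) 4) 1)

-- ===== PORT B =====
-- the 'while stack' loop of _reachable; top of stack at the head (Python pops from the end);
-- fuel only totalizes (≤ ~600 iterations happen, proved below)
def pvReachLoop (obstacles : List (Int × Int)) :
    Nat → List (Int × Int) → List (Int × Int) → Bool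
  | 0, _, _ => false
  | fuel + 1, visited, stack =>
    match stack with
    | [] => false
    | pos :: rest =>
      if pos = pvGOAL then true
      else if visited.contains pos then pvReachLoop obstacles fuel visited rest
      else
        let visited' := PySem.Set.add visited pos
        let stack' := [(pos.1 - 1, pos.2), (pos.1 + 1, pos.2), (pos.1, pos.2 - 1), (pos.1, pos.2 + 1)].foldl
          (fun st nb =>
            if !(visited'.contains nb) && decide (0 ≤ nb.1 ∧ nb.1 < 10) &&
                decide (0 ≤ nb.2 ∧ nb.2 < 10) && !(obstacles.contains nb)
            then nb :: st else st) rest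
        pvReachLoop obstacles fuel visited' stack'

def pvReachable (obstacles : List (Int × Int)) : Bool :=
  if obstacles.contains pvSTART || obstacles.contains pvGOAL then false
  else pvReachLoop obstacles 1000 [] [pvSTART]

def pvSelLoopB (obstacles path : List (Int × Int)) : List Int → Option (Int × Int)
  | [] => none
  | idx :: restIdx =>
    let pos := (PySem.List.pyGet? path idx).getD (0, 0)
    if pos ∉ obstacles ∧ pos ≠ pvSTART ∧ pos ≠ pvGOAL then
      if pvReachable (PySem.Set.add (PySem.Set.ofList obstacles) pos) then some pos
      else pvSelLoopB obstacles path restIdx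
    else pvSelLoopB obstacles path restIdx

def select_flow_obstacle_alt (obstacles : List (Int × Int)) (path : List (Int × Int)) : Option (Int × Int) :=
  if path.length < 6 then none
  else pvSelLoopB obstacles path
    (PySem.List.pyRange (PySem.Int.floordiv (path.length : Int) 4)
      (PySem.Int.floordiv ((path.length : Int) * 3) 4) 1)

-- ===== PRECONDITION & SPEC =====
def Spec_select_flow_obstacle (obstacles : List (Int × Int)) (path : List (Int × Int)) (out : Option (Int × Int)) : Prop := out = select_flow_obstacle_alt obstacles path
instance (obstacles : List (Int × Int)) (path : List (Int × Int)) (out : Option (Int × Int)) : Decidable (Spec_select_flow_obstacle obstacles path out) := by unfold Spec_select_flow_obstacle; infer_instance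

-- ===== CLAIM (what is proved, stated in full; the proofs are below) =====
def Claim_equal_select_flow_obstacle : Prop := ∀ (obstacles : List (Int × Int)) (path : List (Int × Int)), Dom_select_flow_obstacle obstacles path → Spec_select_flow_obstacle obstacles path (select_flow_obstacle obstacles path)

-- ===== LEMMAS AND PROOFS =====

-- abstract reachability on the 10×10 grid avoiding S
def pvInGrid (c : Int × Int) : Prop := 0 ≤ c.1 ∧ c.1 < 10 ∧ 0 ≤ c.2 ∧ c.2 < 10

def pvNbrs (c : Int × Int) : List (Int × Int) := pvDELTAS.map (fun d => (c.1 + d.1, c.2 + d.2))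

def pvStepR (S : List (Int × Int)) (a b : Int × Int) : Prop :=
  b ∈ pvNbrs a ∧ pvIsValid b S = true

def pvReachC (S : List (Int × Int)) (c : Int × Int) : Prop :=
  Relation.ReflTransGen (pvStepR S) pvSTART c

theorem pvIsValid_iff (pos : Int × Int) (S : List (Int × Int)) :
    pvIsValid pos S = true ↔ pvInGrid pos ∧ pos ∉ S := by
  simp [pvIsValid, pvInGrid]
  tauto

theorem bool_eq_of_iff {a b : Bool} (h : a = true ↔ b = true) : a = b := by
  cases a <;> cases b <;> simp_all

theorem pv_len_le_100 (V : List (Int × Int)) (hnd : V.Nodup) (hg : ∀ c ∈ V, pvInGrid c) :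
    V.length ≤ 100 := by
  have h1 : V.toFinset ⊆ (Finset.Icc (0:Int) 9) ×ˢ (Finset.Icc (0:Int) 9) := by
    intro c hc
    have hcv : c ∈ V := List.mem_toFinset.mp hc
    have := hg c hcv
    rcases this with ⟨a, b, cgl, cgr⟩
    simp [Finset.mem_product, Finset.mem_Icc]
    omega
  have h2 : V.toFinset.card = V.length := List.toFinset_card_of_nodup hnd
  have h3 := Finset.card_le_card h1
  rw [h2] at h3
  simpa [Finset.card_product, Int.card_Icc] using h3

theorem pv_goal_mem_grid : pvGOAL ∈ (Finset.Icc (0:Int) 9) ×ˢ (Finset.Icc (0:Int) 9) := by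
  simp [pvGOAL, Finset.mem_product, Finset.mem_Icc]

theorem pv_len_le_99 (V : List (Int × Int)) (hnd : V.Nodup) (hg : ∀ c ∈ V, pvInGrid c)
    (hG : pvGOAL ∉ V) : V.length ≤ 99 := by
  have h1 : V.toFinset ⊆ ((Finset.Icc (0:Int) 9) ×ˢ (Finset.Icc (0:Int) 9)).erase pvGOAL := by
    intro c hc
    have hcv : c ∈ V := List.mem_toFinset.mp hc
    rcases hg c hcv with ⟨a, b, cgl, cgr⟩
    refine Finset.mem_erase.mpr ⟨?_, ?_⟩
    · rintro rfl; exact hG hcv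
    · simp [Finset.mem_product, Finset.mem_Icc]; omega
  have h2 : V.toFinset.card = V.length := List.toFinset_card_of_nodup hnd
  have h3 := Finset.card_le_card h1
  rw [h2, Finset.card_erase_of_mem pv_goal_mem_grid] at h3
  simpa [Finset.card_product, Int.card_Icc] using h3

theorem pv_reach_mem_closed (S V : List (Int × Int))
    (hCl : ∀ c ∈ V, ∀ b ∈ pvNbrs c, pvIsValid b S = true → b ∈ V)
    (hs : pvSTART ∈ V) {c : Int × Int} (h : pvReachC S c) : c ∈ V := by
  induction h with
  | refl => exact hs
  | tail _ h2 ih => exact hCl _ ih _ h2.1 h2.2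

-- characterisation of the inner 'for action in ACTIONS' fold of A's BFS
theorem pv_bfs_fold_spec (S : List (Int × Int)) (s : Int × Int) (p : List (Int × Int)) :
    ∀ (ds : List (Int × Int)) (v : List (Int × Int)) (q : List ((Int × Int) × List (Int × Int))),
    ∃ ex : List (Int × Int),
      ds.foldl (pvBfsStep S s p) (v, q) = (v ++ ex, q ++ ex.map (fun b => (b, p ++ [b]))) ∧
      ex.Nodup ∧
      (∀ b ∈ ex, b ∉ v ∧ b ∈ ds.map (fun d => (s.1 + d.1, s.2 + d.2)) ∧ pvIsValid b S = true) ∧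
      (∀ b ∈ ds.map (fun d => (s.1 + d.1, s.2 + d.2)), pvIsValid b S = true → b ∈ v ++ ex) := by
  intro ds
  induction ds with
  | nil => intro v q; exact ⟨[], by simp⟩
  | cons d ds ih =>
    intro v q
    by_cases hc : (!(v.contains (s.1 + d.1, s.2 + d.2)) && pvIsValid (s.1 + d.1, s.2 + d.2) S) = true
    · obtain ⟨ex', heq, hnd, hprops, hcov⟩ := ih (v ++ [(s.1 + d.1, s.2 + d.2)]) (q ++ [((s.1 + d.1, s.2 + d.2), p ++ [(s.1 + d.1, s.2 + d.2)])])
      have hstep : pvBfsStep S s p (v, q) d =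
          (v ++ [(s.1 + d.1, s.2 + d.2)], q ++ [((s.1 + d.1, s.2 + d.2), p ++ [(s.1 + d.1, s.2 + d.2)])]) := by
        simp only [pvBfsStep]
        rw [if_pos hc]
      rcases Bool.and_eq_true _ _ |>.mp hc with ⟨hnv, hval⟩
      have hnotin : (s.1 + d.1, s.2 + d.2) ∉ v := by
        simpa using hnv
      refine ⟨(s.1 + d.1, s.2 + d.2) :: ex', ?_, ?_, ?_, ?_⟩
      · simp only [List.foldl_cons, hstep, heq]
        simp
      · rw [List.nodup_cons]
        refine ⟨?_, hnd⟩
        intro hmem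
        have := (hprops _ hmem).1
        simp at this
      · intro b hb
        rcases List.mem_cons.mp hb with rfl | hb'
        · exact ⟨hnotin, by simp, hval⟩
        · obtain ⟨hbn, hbm, hbv⟩ := hprops b hb'
          refine ⟨fun h => hbn (by simp [h]), by simp; right; simpa using hbm, hbv⟩
      · intro b hb hbv
        rcases List.mem_cons.mp (by simpa using hb : b ∈ (s.1 + d.1, s.2 + d.2) :: ds.map (fun d => (s.1 + d.1, s.2 + d.2))) with rfl | hb'
        · simp
        · have := hcov b (by simpa using hb') hbv
          simp at this ⊢
          tauto
    · obtain ⟨ex', heq, hnd, hprops, hcov⟩ := ih v q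
      have hstep : pvBfsStep S s p (v, q) d = (v, q) := by
        simp only [pvBfsStep]
        rw [if_neg hc]
      refine ⟨ex', ?_, hnd, ?_, ?_⟩
      · simp only [List.foldl_cons, hstep, heq]
      · intro b hb
        obtain ⟨hbn, hbm, hbv⟩ := hprops b hb
        exact ⟨hbn, by simp; right; simpa using hbm, hbv⟩
      · intro b hb hbv
        rcases List.mem_cons.mp (by simpa using hb : b ∈ (s.1 + d.1, s.2 + d.2) :: ds.map (fun d => (s.1 + d.1, s.2 + d.2))) with rfl | hb'
        · -- not added: either already in v, or invalid (contradiction with hbv)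
          have : v.contains (s.1 + d.1, s.2 + d.2) = true := by
            by_contra hvc
            exact hc (by simp_all)
          simp at this
          simp [this]
        · exact hcov b (by simpa using hb') hbv

-- characterisation of the push fold of B's DFS (generic in the push condition)
theorem pv_dfs_fold_spec (cond : (Int × Int) → Bool) :
    ∀ (ns : List (Int × Int)) (st : List (Int × Int)),
    ∃ ex : List (Int × Int),
      ns.foldl (fun acc nb => if cond nb then nb :: acc else acc) st = ex ++ st ∧
      ex.length ≤ ns.length ∧
      (∀ b ∈ ex, b ∈ ns ∧ cond b = true) ∧
      (∀ b ∈ ns, cond b = true → b ∈ ex ++ st) := by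
  intro ns
  induction ns with
  | nil => intro st; exact ⟨[], by simp⟩
  | cons n ns ih =>
    intro st
    by_cases hc : cond n = true
    · obtain ⟨ex', heq, hlen, hprops, hcov⟩ := ih (n :: st)
      refine ⟨ex' ++ [n], ?_, ?_, ?_, ?_⟩
      · simp only [List.foldl_cons, if_pos hc, heq, List.append_assoc, List.cons_append, List.nil_append]
      · simpa using by omega
      · intro b hb
        rcases List.mem_append.mp hb with hb' | hb'
        · have := hprops b hb'; exact ⟨by simp [this.1], this.2⟩
        · simp at hb'; subst hb'; exact ⟨by simp, hc⟩
      · intro b hb hbv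
        rcases List.mem_cons.mp hb with rfl | hb'
        · simp
        · have := hcov b hb' hbv
          simp at this ⊢
          tauto
    · obtain ⟨ex', heq, hlen, hprops, hcov⟩ := ih st
      refine ⟨ex', ?_, by simpa using Nat.le_succ_of_le hlen, ?_, ?_⟩
      · simp only [List.foldl_cons, if_neg hc, heq]
      · intro b hb; have := hprops b hb; exact ⟨by simp [this.1], this.2⟩
      · intro b hb hbv
        rcases List.mem_cons.mp hb with rfl | hb'
        · exact absurd hbv hc
        · exact hcov b hb' hbv

-- ===== the BFS loop decides reachability =====
theorem pv_bfs_loop_iff (S : List (Int × Int)) :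
    ∀ (fuel : Nat) (visited : List (Int × Int)) (queue : List ((Int × Int) × List (Int × Int)))
    (hVN : visited.Nodup) (hVG : ∀ c ∈ visited, pvInGrid c)
    (hQV : ∀ x ∈ queue, x.1 ∈ visited)
    (hGQ : pvGOAL ∈ visited → pvGOAL ∈ queue.map Prod.fst)
    (hCl : ∀ c ∈ visited, c ∈ queue.map Prod.fst ∨ ∀ b ∈ pvNbrs c, pvIsValid b S = true → b ∈ visited)
    (hR : ∀ c ∈ visited, pvReachC S c)
    (hS : pvSTART ∈ visited)
    (hF : queue.length + (100 - visited.length) ≤ fuel),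
    ((pvBfsLoop S fuel visited queue).1 = true ↔ pvReachC S pvGOAL) := by
  intro fuel
  induction fuel with
  | zero =>
    intro visited queue hVN hVG hQV hGQ hCl hR hS hF
    have hq : queue = [] := by
      have : queue.length = 0 := by omega
      exact List.length_eq_zero_iff.mp this
    subst hq
    simp only [pvBfsLoop]
    simp only [List.map_nil] at hGQ hCl
    constructor
    · intro h; simp at h
    · intro h
      have hclosed : ∀ c ∈ visited, ∀ b ∈ pvNbrs c, pvIsValid b S = true → b ∈ visited := by
        intro c hc
        rcases hCl c hc with h' | h'
        · simp at h'
        · exact h'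
      have := pv_reach_mem_closed S visited hclosed hS h
      have := hGQ this
      simp at this
  | succ fuel ih =>
    intro visited queue hVN hVG hQV hGQ hCl hR hS hF
    match queue with
    | [] =>
      simp only [pvBfsLoop]
      simp only [List.map_nil] at hGQ hCl
      constructor
      · intro h; simp at h
      · intro h
        have hclosed : ∀ c ∈ visited, ∀ b ∈ pvNbrs c, pvIsValid b S = true → b ∈ visited := by
          intro c hc
          rcases hCl c hc with h' | h'
          · simp at h'
          · exact h'
        have := pv_reach_mem_closed S visited hclosed hS h
        have := hGQ this
        simp at this
    | (s, p) :: rest =>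
      by_cases hg : s = pvGOAL
      · simp only [pvBfsLoop, if_pos hg]
        exact ⟨fun _ => hg ▸ hR s (hQV (s, p) (by simp)), fun _ => trivial⟩
      · obtain ⟨ex, heq, hexnd, hexp, hcov⟩ := pv_bfs_fold_spec S s p pvDELTAS visited rest
        have hrun : pvBfsLoop S (fuel + 1) visited ((s, p) :: rest) =
            pvBfsLoop S fuel (visited ++ ex) (rest ++ ex.map (fun b => (b, p ++ [b]))) := by
          simp only [pvBfsLoop, if_neg hg]
          rw [heq]
        rw [hrun]
        have hsv : s ∈ visited := hQV (s, p) (by simp)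
        have hexgrid : ∀ b ∈ ex, pvInGrid b := by
          intro b hb
          exact ((pvIsValid_iff b S).mp (hexp b hb).2.2).1
        have hdisj : ∀ b ∈ ex, b ∉ visited := fun b hb => (hexp b hb).1
        have hVN' : (visited ++ ex).Nodup := by
          apply List.Nodup.append hVN hexnd
          intro a ha hae
          exact (hdisj a hae) ha
        have hVG' : ∀ c ∈ visited ++ ex, pvInGrid c := by
          intro c hc
          rcases List.mem_append.mp hc with h' | h'
          · exact hVG c h'
          · exact hexgrid c h'
        have hlen' : (visited ++ ex).length ≤ 100 := pv_len_le_100 _ hVN' hVG'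
        have hmapfst : (rest ++ ex.map (fun b => (b, p ++ [b]))).map Prod.fst =
            rest.map Prod.fst ++ ex := by
          simp [Function.comp_def]
        apply ih
        · exact hVN'
        · exact hVG'
        · intro x hx
          rcases List.mem_append.mp hx with h' | h'
          · exact List.mem_append.mpr (Or.inl (hQV x (by simp [h'])))
          · rcases List.mem_map.mp h' with ⟨b, hb, rfl⟩
            exact List.mem_append.mpr (Or.inr hb)
        · intro hgv
          rw [hmapfst]
          rcases List.mem_append.mp hgv with h' | h'
          · have := hGQ h'
            simp only [List.map_cons] at this
            rcases List.mem_cons.mp this with h'' | h''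
            · exact absurd h''.symm hg
            · exact List.mem_append.mpr (Or.inl h'')
          · exact List.mem_append.mpr (Or.inr h')
        · intro c hc
          rw [hmapfst]
          rcases List.mem_append.mp hc with h' | h'
          · rcases hCl c h' with h'' | h''
            · simp only [List.map_cons] at h''
              rcases List.mem_cons.mp h'' with h3 | h3
              · -- c = s : now processed, its valid neighbours are all in visited ++ ex
                subst h3
                right
                intro b hb hbv
                exact hcov b (by simpa [pvNbrs] using hb) hbv
              · exact Or.inl (List.mem_append.mpr (Or.inl h3))
            · right
              intro b hb hbv
              exact List.mem_append.mpr (Or.inl (h'' b hb hbv))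
          · exact Or.inl (List.mem_append.mpr (Or.inr h'))
        · intro c hc
          rcases List.mem_append.mp hc with h' | h'
          · exact hR c h'
          · obtain ⟨_, hbm, hbv⟩ := hexp c h'
            exact Relation.ReflTransGen.tail (hR s hsv) ⟨by simpa [pvNbrs] using hbm, hbv⟩
        · exact List.mem_append.mpr (Or.inl hS)
        · have h1 : (visited ++ ex).length = visited.length + ex.length := by simp
          have h2 : (rest ++ ex.map (fun b => (b, p ++ [b]))).length = rest.length + ex.length := by simp
          simp only [List.length_cons] at hF
          omega

-- ===== the DFS loop decides reachability =====
theorem pv_dfs_loop_iff (S : List (Int × Int)) :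
    ∀ (fuel : Nat) (visited stack : List (Int × Int))
    (hVN : visited.Nodup) (hVG : ∀ c ∈ visited, pvInGrid c)
    (hSG : ∀ c ∈ stack, pvInGrid c)
    (hSR : ∀ c ∈ stack, pvReachC S c)
    (hCl : ∀ c ∈ visited, ∀ b ∈ pvNbrs c, pvIsValid b S = true → b ∈ visited ∨ b ∈ stack)
    (hG : pvGOAL ∉ visited)
    (hS : pvSTART ∈ visited ∨ pvSTART ∈ stack)
    (hF : stack.length + 5 * (100 - visited.length) ≤ fuel),
    (pvReachLoop S fuel visited stack = true ↔ pvReachC S pvGOAL) := by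
  intro fuel
  induction fuel with
  | zero =>
    intro visited stack hVN hVG hSG hSR hCl hG hS hF
    have h99 : visited.length ≤ 99 := pv_len_le_99 visited hVN hVG hG
    omega
  | succ fuel ih =>
    intro visited stack hVN hVG hSG hSR hCl hG hS hF
    have h99 : visited.length ≤ 99 := pv_len_le_99 visited hVN hVG hG
    match stack with
    | [] =>
      simp only [pvReachLoop]
      constructor
      · intro h; simp at h
      · intro h
        have hstart : pvSTART ∈ visited := by
          rcases hS with h' | h'
          · exact h'
          · simp at h'
        have hclosed : ∀ c ∈ visited, ∀ b ∈ pvNbrs c, pvIsValid b S = true → b ∈ visited := by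
          intro c hc b hb hbv
          rcases hCl c hc b hb hbv with h' | h'
          · exact h'
          · simp at h'
        exact absurd (pv_reach_mem_closed S visited hclosed hstart h) hG
    | pos :: rest =>
      by_cases hg : pos = pvGOAL
      · simp only [pvReachLoop, if_pos hg]
        exact ⟨fun _ => hg ▸ hSR pos (by simp), fun _ => trivial⟩
      · by_cases hv : visited.contains pos = true
        · have hrun : pvReachLoop S (fuel + 1) visited (pos :: rest) =
              pvReachLoop S fuel visited rest := by
            simp only [pvReachLoop, if_neg hg, if_pos hv]
          rw [hrun]
          have hposv : pos ∈ visited := by simpa using hv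
          apply ih
          · exact hVN
          · exact hVG
          · intro c hc; exact hSG c (by simp [hc])
          · intro c hc; exact hSR c (by simp [hc])
          · intro c hc b hb hbv
            rcases hCl c hc b hb hbv with h' | h'
            · exact Or.inl h'
            · rcases List.mem_cons.mp h' with rfl | h''
              · exact Or.inl hposv
              · exact Or.inr h''
          · exact hG
          · rcases hS with h' | h'
            · exact Or.inl h'
            · rcases List.mem_cons.mp h' with rfl | h''
              · exact Or.inl hposv
              · exact Or.inr h''
          · simp only [List.length_cons] at hF; omega
        · -- new cell: mark visited, push unvisited valid neighbours
          have hposnv : pos ∉ visited := by simpa using hv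
          have hadd : PySem.Set.add visited pos = visited ++ [pos] := by
            simp [PySem.Set.add, hv]
            exact hposnv
          obtain ⟨ex, heq, hexlen, hexp, hcov⟩ :=
            pv_dfs_fold_spec
              (fun nb => !((PySem.Set.add visited pos).contains nb) && decide (0 ≤ nb.1 ∧ nb.1 < 10) &&
                decide (0 ≤ nb.2 ∧ nb.2 < 10) && !(S.contains nb))
              [(pos.1 - 1, pos.2), (pos.1 + 1, pos.2), (pos.1, pos.2 - 1), (pos.1, pos.2 + 1)] rest
          have hrun : pvReachLoop S (fuel + 1) visited (pos :: rest) =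
              pvReachLoop S fuel (PySem.Set.add visited pos) (ex ++ rest) := by
            simp only [pvReachLoop, if_neg hg, if_neg hv]
            rw [heq]
          rw [hrun, hadd]
          have hnbrs : pvNbrs pos = [(pos.1 - 1, pos.2), (pos.1 + 1, pos.2), (pos.1, pos.2 - 1), (pos.1, pos.2 + 1)] := by
            simp [pvNbrs, pvDELTAS, sub_eq_add_neg]
          have hcond : ∀ b, (!((PySem.Set.add visited pos).contains b) && decide (0 ≤ b.1 ∧ b.1 < 10) &&
              decide (0 ≤ b.2 ∧ b.2 < 10) && !(S.contains b)) = true ↔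
              (b ∉ visited ++ [pos] ∧ pvIsValid b S = true) := by
            intro b
            rw [hadd]
            simp [pvIsValid]
            tauto
          have hexvalid : ∀ b ∈ ex, b ∉ visited ++ [pos] ∧ pvIsValid b S = true := by
            intro b hb
            exact (hcond b).mp (hexp b hb).2
          have hexnbr : ∀ b ∈ ex, b ∈ pvNbrs pos := by
            intro b hb
            rw [hnbrs]; exact (hexp b hb).1
          have hposgrid : pvInGrid pos := hSG pos (by simp)
          have hVN' : (visited ++ [pos]).Nodup := by
            apply List.Nodup.append hVN (by simp)
            intro a ha hap
            simp at hap
            subst hap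
            exact hposnv ha
          have hVG' : ∀ c ∈ visited ++ [pos], pvInGrid c := by
            intro c hc
            rcases List.mem_append.mp hc with h' | h'
            · exact hVG c h'
            · simp at h'; subst h'; exact hposgrid
          apply ih
          · exact hVN'
          · exact hVG'
          · intro c hc
            rcases List.mem_append.mp hc with h' | h'
            · exact ((pvIsValid_iff c S).mp (hexvalid c h').2).1
            · exact hSG c (by simp [h'])
          · intro c hc
            rcases List.mem_append.mp hc with h' | h'
            · exact Relation.ReflTransGen.tail (hSR pos (by simp)) ⟨hexnbr c h', (hexvalid c h').2⟩
            · exact hSR c (by simp [h'])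
          · intro c hc b hb hbv
            rcases List.mem_append.mp hc with h' | h'
            · rcases hCl c h' b hb hbv with h'' | h''
              · exact Or.inl (List.mem_append.mpr (Or.inl h''))
              · rcases List.mem_cons.mp h'' with rfl | h3
                · exact Or.inl (by simp)
                · exact Or.inr (List.mem_append.mpr (Or.inr h3))
            · -- c = pos : every valid neighbour is visited or freshly pushed
              simp at h'
              rw [h'] at hb
              by_cases hbm : b ∈ visited ++ [pos]
              · exact Or.inl hbm
              · have : b ∈ ex ++ rest := by
                  apply hcov b (by rw [← hnbrs]; exact hb)
                  exact (hcond b).mpr ⟨hbm, hbv⟩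
                exact Or.inr this
          · intro hgm
            rcases List.mem_append.mp hgm with h' | h'
            · exact hG h'
            · simp at h'; exact hg h'.symm
          · rcases hS with h' | h'
            · exact Or.inl (List.mem_append.mpr (Or.inl h'))
            · rcases List.mem_cons.mp h' with rfl | h''
              · exact Or.inl (by simp)
              · exact Or.inr (List.mem_append.mpr (Or.inr h''))
          · have h1 : (ex ++ rest).length = ex.length + rest.length := by simp
            have h2 : (visited ++ [pos]).length = visited.length + 1 := by simp
            simp only [List.length_cons] at hF
            simp only [List.length_cons, List.length_nil] at hexlen
            omega

-- same obstacle membership ⇒ same reachability relation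
theorem pv_reach_congr (S S' : List (Int × Int)) (hm : ∀ c, c ∈ S ↔ c ∈ S') (c : Int × Int) :
    pvReachC S c ↔ pvReachC S' c := by
  have hval : ∀ b, pvIsValid b S = pvIsValid b S' := by
    intro b
    apply bool_eq_of_iff
    rw [pvIsValid_iff, pvIsValid_iff, hm b]
  constructor
  · exact Relation.ReflTransGen.mono (fun a b h => ⟨h.1, (hval b) ▸ h.2⟩)
  · exact Relation.ReflTransGen.mono (fun a b h => ⟨h.1, (hval b) ▸ h.2⟩)

theorem pv_contains_congr (S S' : List (Int × Int)) (hm : ∀ c, c ∈ S ↔ c ∈ S') (c : Int × Int) :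
    S.contains c = S'.contains c := by
  apply bool_eq_of_iff
  simpa using hm c

-- the two reachability tests agree on membership-equal obstacle sets
theorem pv_inner_eq (S S' : List (Int × Int)) (hm : ∀ c, c ∈ S ↔ c ∈ S') :
    (pvBfsPathExists S).1 = pvReachable S' := by
  have hgeq : (S.contains pvSTART || S.contains pvGOAL) = (S'.contains pvSTART || S'.contains pvGOAL) := by
    rw [pv_contains_congr S S' hm pvSTART, pv_contains_congr S S' hm pvGOAL]
  by_cases hg : (S.contains pvSTART || S.contains pvGOAL) = true
  · simp only [pvBfsPathExists, pvReachable, if_pos hg, if_pos (hgeq ▸ hg)]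
  · simp only [pvBfsPathExists, pvReachable, if_neg hg, if_neg (hgeq ▸ hg)]
    have hbfs := pv_bfs_loop_iff S 1000 [pvSTART] [(pvSTART, [pvSTART])]
      (by simp) (by intro c hc; simp at hc; subst hc; exact ⟨by norm_num [pvSTART], by norm_num [pvSTART], by norm_num [pvSTART]⟩)
      (by intro x hx; simp at hx; simp [hx])
      (by intro h; simp [pvSTART, pvGOAL] at h)
      (by intro c hc; simp at hc; subst hc; exact Or.inl (by simp))
      (by intro c hc; simp at hc; subst hc; exact Relation.ReflTransGen.refl)
      (by simp)
      (by simp)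
    have hdfs := pv_dfs_loop_iff S' 1000 [] [pvSTART]
      (by simp) (by simp)
      (by intro c hc; simp at hc; subst hc; exact ⟨by norm_num [pvSTART], by norm_num [pvSTART], by norm_num [pvSTART]⟩)
      (by intro c hc; simp at hc; subst hc; exact Relation.ReflTransGen.refl)
      (by simp)
      (by simp)
      (Or.inr (by simp))
      (by simp)
    apply bool_eq_of_iff
    rw [hbfs, hdfs]
    exact pv_reach_congr S S' hm pvGOAL

-- at the call sites the two obstacle sets have the same members
theorem pv_blocked_mem (obstacles : List (Int × Int)) (pos : Int × Int) (c : Int × Int) :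
    c ∈ PySem.Set.union obstacles [pos] ↔ c ∈ PySem.Set.add (PySem.Set.ofList obstacles) pos := by
  have h1 : c ∈ PySem.Set.union obstacles [pos] ↔ c ∈ obstacles ∨ c = pos := by
    simp [PySem.Set.union, PySem.Set.update, PySem.Set.add]
    split
    · next h => constructor
                · tauto
                · rintro (h' | rfl)
                  · exact h'
                  · simpa using h
    · simp
  have h2 : c ∈ PySem.Set.add (PySem.Set.ofList obstacles) pos ↔ c ∈ obstacles ∨ c = pos := by
    rw [PySem.Set.mem_add, PySem.Set.mem_ofList]
  rw [h1, h2]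

theorem pv_sel_loop_eq (obstacles path : List (Int × Int)) :
    ∀ idxs : List Int, pvSelLoopA obstacles path idxs = pvSelLoopB obstacles path idxs := by
  intro idxs
  induction idxs with
  | nil => rfl
  | cons idx rest ih =>
    simp only [pvSelLoopA, pvSelLoopB]
    split
    · rw [pv_inner_eq _ _ (pv_blocked_mem obstacles ((PySem.List.pyGet? path idx).getD (0, 0)))]
      split
      · rfl
      · exact ih
    · exact ih

-- ===== VERDICT (by name: the statement is the Claim_ definition above) =====
theorem select_flow_obstacle_spec : Claim_equal_select_flow_obstacle := by
  intro obstacles path _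
  unfold Spec_select_flow_obstacle select_flow_obstacle select_flow_obstacle_alt
  split
  · rfl
  · exact pv_sel_loop_eq obstacles path _
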